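-- pv_equiv track=rewrite | github.com/Thrigger/advent_of_code | 2021/python/d12_2.py | notVisited
-- ===== SOURCE A (Python) =====
-- def noDoubleYet(visited):
--     for each in visited:
--         if any(c for c in each if c.islower()) and not(each in ["start", "end"]):
--             if visited.count(each) > 1:
--                 return False
--     return True
--
-- def notVisited(visited, current):
--     if current == "end":
--         return True
--     elif current == "start":
--         return False
--     elif any(c for c in current if c.islower()):
--         if current in visited:
--             if noDoubleYet(visited):
--                 return True
--             return False
--     return True
-- ===== SOURCE B (Python) =====
-- def notVisited(visited, current):
--     if current == "end":
--         return True
--     if current == "start":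
--         return False
--     if not any(ch.islower() for ch in current) or current not in visited:
--         return True
--     # sort-then-scan duplicate detection: sort the small caves and look for equal neighbours
--     smalls = sorted(c for c in visited
--                     if any(ch.islower() for ch in c) and c not in ("start", "end"))
--     return all(a != b for a, b in zip(smalls, smalls[1:]))
-- ===== Notes on version B (the rewrite author's own statement) =====
-- stated objective: alternative
-- what changed: Replaced the per-element count-scan of the noDoubleYet helper by a sort-then-scan: filter the small caves once, sort them, and check that no two adjacent entries are equal.
import Mathlib
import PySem

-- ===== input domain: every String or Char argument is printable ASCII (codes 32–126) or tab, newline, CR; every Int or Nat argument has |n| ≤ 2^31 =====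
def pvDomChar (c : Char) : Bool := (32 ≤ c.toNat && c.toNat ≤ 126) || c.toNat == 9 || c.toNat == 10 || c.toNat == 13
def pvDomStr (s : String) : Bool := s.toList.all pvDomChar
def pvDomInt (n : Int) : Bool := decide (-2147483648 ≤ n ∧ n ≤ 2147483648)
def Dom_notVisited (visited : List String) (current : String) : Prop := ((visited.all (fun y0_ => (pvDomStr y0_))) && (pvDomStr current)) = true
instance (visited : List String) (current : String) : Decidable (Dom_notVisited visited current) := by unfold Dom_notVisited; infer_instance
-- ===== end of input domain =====

-- B replaces noDoubleYet's per-element count-scan by a sort-then-scan of the small caves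
-- (sort them, then check no two adjacent entries are equal); objective: alternative algorithm.

-- ===== PORT A =====
-- helper noDoubleYet: the for-loop is the structural recursion noDoubleYetLoop over the list,
-- carrying the full list for visited.count(each)
def noDoubleYetLoop (full : List String) : List String → Bool
  | [] => true
  | each :: rest =>
    if each.toList.any PySem.Chars.islower && !(["start", "end"].contains each) then
      if PySem.List.count full each > 1 then false
      else noDoubleYetLoop full rest
    else noDoubleYetLoop full rest

def noDoubleYet (visited : List String) : Bool :=
  noDoubleYetLoop visited visited

def notVisited (visited : List String) (current : String) : Bool :=
  if current == "end" then true
  else if current == "start" then false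
  else if current.toList.any PySem.Chars.islower then
    if visited.contains current then
      if noDoubleYet visited then true else false
    else true
  else true

-- ===== PORT B =====
def notVisited_alt (visited : List String) (current : String) : Bool :=
  if current == "end" then true
  else if current == "start" then false
  else if !(current.toList.any PySem.Chars.islower) || !(visited.contains current) then true
  else
    let smalls := PySem.List.sorted
      (visited.filter (fun c => c.toList.any PySem.Chars.islower && !(["start", "end"].contains c)))
      (fun x => x) false
    (smalls.zip smalls.tail).all (fun p => p.1 != p.2)

-- ===== PRECONDITION & SPEC =====
def Spec_notVisited (visited : List String) (current : String) (out : Bool) : Prop := out = notVisited_alt visited current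
instance (visited : List String) (current : String) (out : Bool) : Decidable (Spec_notVisited visited current out) := by unfold Spec_notVisited; infer_instance

-- ===== CLAIM (what is proved, stated in full; the proofs are below) =====
def Claim_equal_notVisited : Prop := ∀ (visited : List String) (current : String), Dom_notVisited visited current → Spec_notVisited visited current (notVisited visited current)

-- ===== LEMMAS AND PROOFS =====

-- the small-cave test both programs use
def pvSmall (c : String) : Bool :=
  c.toList.any PySem.Chars.islower && !(["start", "end"].contains c)

lemma noDoubleYetLoop_true_iff (full l : List String) :
    noDoubleYetLoop full l = true ↔
      ∀ c ∈ l, pvSmall c = true → PySem.List.count full c ≤ 1 := by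
  induction l with
  | nil => simp [noDoubleYetLoop]
  | cons each rest ih =>
    simp only [noDoubleYetLoop, pvSmall] at *
    split_ifs with h1 h2
    · constructor
      · intro h; cases h
      · intro h
        have := h each (by simp) h1
        omega
    · simp only [ih]
      constructor
      · intro h c hc hs
        rcases List.mem_cons.mp hc with rfl | hc
        · omega
        · exact h c hc hs
      · intro h c hc hs
        exact h c (List.mem_cons_of_mem _ hc) hs
    · constructor
      · intro h c hc hs
        rcases List.mem_cons.mp hc with rfl | hc
        · exact absurd hs h1
        · exact (ih.mp h) c hc hs
      · intro h
        exact ih.mpr (fun c hc hs => h c (List.mem_cons_of_mem _ hc) hs)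

lemma nodup_smalls_iff (visited : List String) :
    (visited.filter pvSmall).Nodup ↔
      ∀ c ∈ visited, pvSmall c = true → PySem.List.count visited c ≤ 1 := by
  rw [List.nodup_iff_count_le_one]
  constructor
  · intro h c hc hs
    have := h c
    rw [List.count_filter hs] at this
    simpa [PySem.List.count] using this
  · intro h a
    by_cases hs : pvSmall a = true
    · rw [List.count_filter hs]
      by_cases ha : a ∈ visited
      · simpa [PySem.List.count] using h a ha hs
      · simp [List.count_eq_zero_of_not_mem ha]
    · have : a ∉ visited.filter pvSmall := by
        intro hmem
        exact hs (List.of_mem_filter hmem)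
      simp [List.count_eq_zero_of_not_mem this]

-- B's adjacent-pairs scan is the Chain' (· ≠ ·) predicate
lemma adjAll_iff_chain' : ∀ (l : List String),
    ((l.zip l.tail).all (fun p => p.1 != p.2) = true) ↔ l.IsChain (· ≠ ·)
  | [] => by simp
  | [a] => by simp
  | a :: b :: t => by
    have ih := adjAll_iff_chain' (b :: t)
    simp only [List.tail_cons, List.zip_cons_cons, List.all_cons, List.isChain_cons_cons,
      Bool.and_eq_true, bne_iff_ne, ne_eq] at *
    rw [ih]

-- on a ≤-sorted list, adjacent distinctness is Nodup
lemma chain'_ne_iff_nodup : ∀ (l : List String), l.Pairwise (· ≤ ·) →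
    (l.IsChain (· ≠ ·) ↔ l.Nodup)
  | [], _ => by simp
  | a :: t, h => by
    rcases List.pairwise_cons.mp h with ⟨ha, ht⟩
    rw [List.nodup_cons, ← chain'_ne_iff_nodup t ht]
    cases t with
    | nil => simp
    | cons b t' =>
      rw [List.isChain_cons_cons]
      constructor
      · rintro ⟨hab, hc⟩
        refine ⟨?_, hc⟩
        intro hmem
        rcases List.mem_cons.mp hmem with rfl | hmem'
        · exact hab rfl
        · have h1 : a ≤ b := ha b (List.mem_cons_self)
          have h2 : b ≤ a := (List.pairwise_cons.mp ht).1 a hmem'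
          exact hab (le_antisymm h1 h2)
      · rintro ⟨hnm, hc⟩
        exact ⟨fun hab => hnm (hab ▸ List.mem_cons_self), hc⟩

lemma middle_eq (visited : List String) :
    noDoubleYet visited =
      (let smalls := PySem.List.sorted (visited.filter pvSmall) (fun x => x) false
       (smalls.zip smalls.tail).all (fun p => p.1 != p.2)) := by
  set smalls := PySem.List.sorted (visited.filter pvSmall) (fun x => x) false with hsm
  have hpair : smalls.Pairwise (· ≤ ·) := by
    have := PySem.List.sorted_pairwise (xs := visited.filter pvSmall) (key := fun x => x)
    simpa [hsm] using this
  have hA : noDoubleYet visited = true ↔ (visited.filter pvSmall).Nodup := by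
    unfold noDoubleYet
    rw [noDoubleYetLoop_true_iff, nodup_smalls_iff]
  have hB : ((smalls.zip smalls.tail).all (fun p => p.1 != p.2) = true) ↔
      (visited.filter pvSmall).Nodup := by
    rw [adjAll_iff_chain', chain'_ne_iff_nodup smalls hpair]
    exact (PySem.List.sorted_perm _ _ _).nodup_iff
  simp only []
  rcases Bool.eq_false_or_eq_true (noDoubleYet visited) with htr | hf
  · rw [htr, hB.mpr (hA.mp htr)]
  · rcases Bool.eq_false_or_eq_true ((smalls.zip smalls.tail).all (fun p => p.1 != p.2)) with ht2 | hf2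
    · exact absurd (hA.mpr (hB.mp ht2)) (by rw [hf]; simp)
    · rw [hf, hf2]

-- ===== VERDICT (by name: the statement is the Claim_ definition above) =====
theorem notVisited_spec : Claim_equal_notVisited := by
  intro visited current _
  unfold Spec_notVisited notVisited notVisited_alt
  by_cases h1 : current == "end"
  · simp [h1]
  · by_cases h2 : current == "start"
    · simp [h1, h2]
    · by_cases h3 : current.toList.any PySem.Chars.islower
      · by_cases h4 : visited.contains current
        · simp only [h1, h2, h3, h4, if_true, if_false, Bool.not_true, Bool.false_or,
            Bool.false_eq_true]
          rw [show (if noDoubleYet visited then true else false) = noDoubleYet visited from by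
            cases noDoubleYet visited <;> rfl]
          exact middle_eq visited
        · have h4' : ¬ current ∈ visited := by
            simpa [List.contains_iff_mem] using h4
          simp [h1, h2, h3, h4']
      · simp [h1, h2, Bool.eq_false_iff.mpr h3]
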